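-- pv_equiv track=rewrite | github.com/MatN23/LuminaAI | Src/Main_Scripts/Dataset_download.py | _cpu_deduplication
-- ===== SOURCE A (Python) =====
-- from typing import Optional, Dict, List, Tuple
--
-- def _cpu_deduplication(conversation_ids: List[str]) -> List[bool]:
--     """CPU fallback for deduplication."""
--     seen_ids = set()
--     is_unique = []
--     for conv_id in conversation_ids:
--         if conv_id not in seen_ids:
--             is_unique.append(True)
--             seen_ids.add(conv_id)
--         else:
--             is_unique.append(False)
--     return is_unique
-- ===== SOURCE B (Python) =====
-- from typing import List
--
-- def _cpu_deduplication(conversation_ids: List[str]) -> List[bool]: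
--     """Two-phase: build a first-occurrence index, then compare positions."""
--     first = {}
--     for i, conv_id in enumerate(conversation_ids):
--         first.setdefault(conv_id, i)
--     return [i == first[conv_id] for i, conv_id in enumerate(conversation_ids)]
-- ===== Notes on version B (the rewrite author's own statement) =====
-- stated objective: alternative
-- what changed: Replaces the single stateful grow-a-set loop (append True/False per branch) with two phases: a dict mapping each id to its first-occurrence index built by setdefault, then a positional comparison pass marking True exactly at first-occurrence indices.
import Mathlib
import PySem

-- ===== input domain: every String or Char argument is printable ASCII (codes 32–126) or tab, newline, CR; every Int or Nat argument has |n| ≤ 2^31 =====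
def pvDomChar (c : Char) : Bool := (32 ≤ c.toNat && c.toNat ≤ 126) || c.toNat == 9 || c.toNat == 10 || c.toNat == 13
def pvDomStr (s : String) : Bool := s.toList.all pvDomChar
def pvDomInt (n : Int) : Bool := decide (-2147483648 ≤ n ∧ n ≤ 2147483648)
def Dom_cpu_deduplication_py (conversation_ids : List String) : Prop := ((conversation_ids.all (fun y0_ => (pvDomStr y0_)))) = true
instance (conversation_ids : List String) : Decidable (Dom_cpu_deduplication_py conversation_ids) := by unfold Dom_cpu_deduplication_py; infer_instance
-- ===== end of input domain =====

-- B replaces A's single stateful set-growing loop by a first-occurrence index dict plus a positional comparison pass (alternative decomposition, same cost).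

-- ===== PORT A =====
-- seen_ids = set(); is_unique = []; for conv_id in ...: if conv_id not in seen_ids: append True, add; else append False
def cpu_deduplication_py (conversation_ids : List String) : List Bool :=
  (conversation_ids.foldl
    (fun (st : PySem.Set String × List Bool) conv_id =>
      if !(PySem.Set.contains st.1 conv_id) then
        (PySem.Set.add st.1 conv_id, st.2 ++ [true])
      else
        (st.1, st.2 ++ [false]))
    (PySem.Set.empty, [])).2

-- ===== PORT B =====
-- first = {}; for i, conv_id in enumerate(...): first.setdefault(conv_id, i)
-- return [i == first[conv_id] for i, conv_id in enumerate(...)]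
-- (first[conv_id] is always present — every id was setdefault'ed — so getD's default -1 is never used)
def cpu_deduplication_py_alt (conversation_ids : List String) : List Bool :=
  let first : PySem.Dict String Int :=
    (PySem.List.enumerate conversation_ids 0).foldl
      (fun d p => d.setdefault p.2 p.1) PySem.Dict.empty
  (PySem.List.enumerate conversation_ids 0).map
    (fun p => decide (p.1 = first.getD p.2 (-1)))

-- ===== PRECONDITION & SPEC =====
def Spec_cpu_deduplication_py (conversation_ids : List String) (out : List Bool) : Prop := out = cpu_deduplication_py_alt conversation_ids
instance (conversation_ids : List String) (out : List Bool) : Decidable (Spec_cpu_deduplication_py conversation_ids out) := by unfold Spec_cpu_deduplication_py; infer_instance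

-- ===== CLAIM (what is proved, stated in full; the proofs are below) =====
def Claim_equal_cpu_deduplication_py : Prop := ∀ (conversation_ids : List String), Dom_cpu_deduplication_py conversation_ids → Spec_cpu_deduplication_py conversation_ids (cpu_deduplication_py conversation_ids)

-- ===== LEMMAS AND PROOFS =====

-- reference: element k is True iff ids[k] does not occur in the prefix before it
def pvRef (pre ids : List String) : List Bool :=
  match ids with
  | [] => []
  | x :: xs => (!pre.contains x) :: pvRef (pre ++ [x]) xs

theorem pvRef_length (pre ids : List String) : (pvRef pre ids).length = ids.length := by
  induction ids generalizing pre with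
  | nil => rfl
  | cons x xs ih => simp [pvRef, ih]

theorem pvRef_getElem (ids : List String) : ∀ (pre : List String) (k : Nat) (h : k < ids.length),
    (pvRef pre ids)[k]'(by rw [pvRef_length]; exact h) = !((pre ++ ids.take k).contains (ids[k]'h)) := by
  induction ids with
  | nil => intro _ k h; simp at h
  | cons x xs ih =>
    intro pre k h
    cases k with
    | zero => simp [pvRef]
    | succ k =>
      have hk : k < xs.length := by simpa using h
      simp only [pvRef, List.getElem_cons_succ, List.take_succ_cons]
      rw [ih (pre ++ [x]) k hk]
      simp [List.append_assoc]

theorem A_fold (ids : List String) : ∀ (pre : List String) (acc : List Bool),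
    (ids.foldl
      (fun (st : PySem.Set String × List Bool) conv_id =>
        if !(PySem.Set.contains st.1 conv_id) then
          (PySem.Set.add st.1 conv_id, st.2 ++ [true])
        else
          (st.1, st.2 ++ [false]))
      (PySem.Set.ofList pre, acc)).2 = acc ++ pvRef pre ids := by
  induction ids with
  | nil => intro pre acc; simp [pvRef]
  | cons x xs ih =>
    intro pre acc
    by_cases hx : x ∈ pre
    · have hc : PySem.Set.contains (PySem.Set.ofList pre) x = true := by
        rw [PySem.Set.contains_iff, PySem.Set.mem_ofList]; exact hx
      have hadd : PySem.Set.ofList (pre ++ [x]) = PySem.Set.ofList pre := by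
        rw [PySem.Set.ofList_append_singleton, PySem.Set.add_of_mem]
        rw [PySem.Set.mem_ofList]; exact hx
      simp only [List.foldl_cons, hc, Bool.not_true, Bool.false_eq_true, if_false]
      rw [← hadd, ih (pre ++ [x]) (acc ++ [false])]
      simp [pvRef, hx]
    · have hc : PySem.Set.contains (PySem.Set.ofList pre) x = false := by
        rw [Bool.eq_false_iff, ne_eq, PySem.Set.contains_iff, PySem.Set.mem_ofList]; exact hx
      have hadd : PySem.Set.add (PySem.Set.ofList pre) x = PySem.Set.ofList (pre ++ [x]) := by
        rw [PySem.Set.ofList_append_singleton]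
      simp only [List.foldl_cons, hc, Bool.not_false, if_true]
      rw [hadd, ih (pre ++ [x]) (acc ++ [true])]
      simp [pvRef, hx]

theorem A_eq_ref (ids : List String) : cpu_deduplication_py ids = pvRef [] ids := by
  have := A_fold ids [] []
  simpa [cpu_deduplication_py, PySem.Set.empty] using this

-- the setdefault fold computes, for each key, the index of its first occurrence
theorem firstDict_get? (ids : List String) : ∀ (d : PySem.Dict String Int) (s : Int) (x : String),
    ((PySem.List.enumerate ids s).foldl (fun d p => d.setdefault p.2 p.1) d).get? x
      = ((d.get? x).or ((PySem.List.index? ids x).map (fun k => s + (k : Int)))) := by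
  induction ids with
  | nil =>
    intro d s x
    simp [PySem.List.enumerate_nil, PySem.List.index?_eq_idxOf?]
  | cons y ys ih =>
    intro d s x
    rw [PySem.List.enumerate_cons]
    simp only [List.foldl_cons]
    rw [ih (d.setdefault y s) (s + 1) x]
    by_cases hxy : x = y
    · subst hxy
      rw [PySem.Dict.get?_setdefault_self d x s]
      rw [PySem.List.index?_cons_self x ys]
      cases hd : d.get? x <;> simp
    · rw [PySem.Dict.get?_setdefault_of_ne d s hxy]
      rw [PySem.List.index?_cons_of_ne ys (fun h => hxy h.symm)]
      cases hd : d.get? x with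
      | some v => simp
      | none =>
        simp only [Option.none_or]
        cases hi : PySem.List.index? ys x <;> simp
        omega

theorem mem_take_iff (ids : List String) (k : Nat) (x : String) :
    x ∈ ids.take k ↔ ∃ i, ∃ h : i < ids.length, i < k ∧ ids[i] = x := by
  rw [List.mem_take_iff_getElem]
  constructor
  · rintro ⟨i, hi, hx⟩
    exact ⟨i, by omega, by omega, hx⟩
  · rintro ⟨i, h, hik, hx⟩
    exact ⟨i, by omega, hx⟩

theorem B_eq_ref (ids : List String) : cpu_deduplication_py_alt ids = pvRef [] ids := by
  apply List.ext_getElem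
  · simp [cpu_deduplication_py_alt, PySem.List.length_enumerate, pvRef_length]
  · intro k hk hk'
    have hkl : k < ids.length := by
      simpa [cpu_deduplication_py_alt, PySem.List.length_enumerate] using hk
    rw [pvRef_getElem ids [] k hkl]
    simp only [cpu_deduplication_py_alt, List.getElem_map, PySem.List.getElem_enumerate]
    -- compute the dict lookup
    have hget := firstDict_get? ids PySem.Dict.empty 0 (ids[k]'hkl)
    rw [PySem.Dict.get?_empty] at hget
    have hmem : (ids[k]'hkl) ∈ ids := List.getElem_mem hkl
    obtain ⟨j, hj⟩ : ∃ j, PySem.List.index? ids (ids[k]'hkl) = some j := by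
      cases hi : PySem.List.index? ids (ids[k]'hkl) with
      | none => rw [PySem.List.index?_eq_none_iff] at hi; exact absurd hmem hi
      | some j => exact ⟨j, rfl⟩
    obtain ⟨hjl, hjx, hjmin⟩ := PySem.List.getElem_of_index?_eq_some hj
    rw [hj] at hget
    simp only [Option.none_or, zero_add] at hget
    have hgd : (((PySem.List.enumerate ids 0).foldl (fun d p => d.setdefault p.2 p.1)
        PySem.Dict.empty).getD (ids[k]'hkl) (-1)) = (j : Int) := by
      rw [PySem.Dict.getD_eq_get?_getD, hget]; rfl
    rw [hgd]
    by_cases hmemtake : (ids[k]'hkl) ∈ ids.take k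
    · -- a duplicate: first occurrence strictly before k
      have hjk : j ≠ k := by
        rw [mem_take_iff] at hmemtake
        obtain ⟨i, hi, hik, hix⟩ := hmemtake
        have hji : j ≤ i := by
          by_contra hlt
          exact hjmin i (by omega) hix
        omega
      simp [hmemtake]
      exact_mod_cast fun h => hjk (by exact_mod_cast h.symm)
    · -- first occurrence: j = k
      have hjk : j = k := by
        have hjk1 : ¬ j < k := by
          intro hlt
          exact hmemtake ((mem_take_iff ids k _).mpr ⟨j, hjl, hlt, hjx⟩)
        have hjk2 : ¬ k < j := fun hlt => hjmin k hlt rfl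
        omega
      simp [hmemtake, hjk]

-- ===== VERDICT (by name: the statement is the Claim_ definition above) =====
theorem cpu_deduplication_py_spec : Claim_equal_cpu_deduplication_py := by
  intro ids _
  unfold Spec_cpu_deduplication_py
  rw [A_eq_ref, B_eq_ref]
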